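-- pv_equiv track=rewrite | github.com/doubleZ0108/Leetcode | python/1664.生成平衡数组的方案数.py | waysToMakeFair1
-- ===== SOURCE A (Python) =====
-- from typing import List
--
-- def waysToMakeFair1(nums: List[int]) -> int:
--     leftsum0, leftsum1 = 0, 0
--     res = 0
--     for i in range(len(nums)):
--         rightsum0, rightsum1 = 0, 0
--         for j in range(i+1, len(nums)):
--             if (j-1)%2==0:
--                 rightsum0 += nums[j]
--             else:
--                 rightsum1 += nums[j]
--
--         if leftsum0+rightsum0 == leftsum1+rightsum1:
--             res += 1
--
--         if i%2==0:
--             leftsum0 += nums[i]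
--         else:
--             leftsum1 += nums[i]
--     return res
-- ===== SOURCE B (Python) =====
-- from typing import List
--
-- def waysToMakeFair1(nums: List[int]) -> int:
--     total0 = sum(v for i, v in enumerate(nums) if i % 2 == 0)
--     total1 = sum(v for i, v in enumerate(nums) if i % 2 == 1)
--     left0 = left1 = res = 0
--     for i, v in enumerate(nums):
--         if i % 2 == 0:
--             suf0, suf1 = total0 - left0 - v, total1 - left1
--         else:
--             suf0, suf1 = total0 - left0, total1 - left1 - v
--         if left0 + suf1 == left1 + suf0:
--             res += 1
--         if i % 2 == 0:
--             left0 += v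
--         else:
--             left1 += v
--     return res
-- ===== Notes on version B (the rewrite author's own statement) =====
-- stated objective: faster
-- what changed: Replaced the O(n^2) recomputation of right-side even/odd sums for every index by precomputed even/odd totals and a single pass maintaining prefix sums, deriving the suffix sums by subtraction.
import Mathlib
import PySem

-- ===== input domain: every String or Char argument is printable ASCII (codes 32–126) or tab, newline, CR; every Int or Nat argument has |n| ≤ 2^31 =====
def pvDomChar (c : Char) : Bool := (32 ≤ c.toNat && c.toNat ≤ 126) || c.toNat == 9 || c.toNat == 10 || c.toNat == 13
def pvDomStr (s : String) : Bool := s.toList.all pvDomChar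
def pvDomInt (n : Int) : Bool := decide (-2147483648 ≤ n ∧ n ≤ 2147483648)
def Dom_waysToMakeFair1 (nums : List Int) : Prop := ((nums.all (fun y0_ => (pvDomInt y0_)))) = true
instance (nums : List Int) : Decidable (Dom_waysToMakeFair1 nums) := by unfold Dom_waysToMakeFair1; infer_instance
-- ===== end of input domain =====

-- B replaces A's O(n^2) recomputation of the right-side even/odd sums by precomputed totals
-- and one pass with prefix sums (suffix sums obtained by subtraction).

-- ===== PORT A =====
-- inner loop of A: right-side sums for removal index i
def pvInnerA (nums : List Int) (i n : Int) : Int × Int :=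
  (PySem.List.pyRange (i + 1) n).foldl
    (fun r j =>
      if PySem.Int.mod (j - 1) 2 == 0 then (r.1 + PySem.List.pyGetD nums j 0, r.2)
      else (r.1, r.2 + PySem.List.pyGetD nums j 0)) (0, 0)

-- one outer-loop iteration of A; state = (leftsum0, leftsum1, res)
def pvStepA (nums : List Int) (n : Int) (st : Int × Int × Int) (i : Int) : Int × Int × Int :=
  let r := pvInnerA nums i n
  let res := if st.1 + r.1 == st.2.1 + r.2 then st.2.2 + 1 else st.2.2
  if PySem.Int.mod i 2 == 0 then (st.1 + PySem.List.pyGetD nums i 0, st.2.1, res)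
  else (st.1, st.2.1 + PySem.List.pyGetD nums i 0, res)

def waysToMakeFair1 (nums : List Int) : Int :=
  let n := PySem.List.len nums
  ((PySem.List.pyRange 0 n).foldl (pvStepA nums n) (0, 0, 0)).2.2

-- ===== PORT B =====
-- one loop iteration of B; state = (left0, left1, res), p = (i, v) from enumerate
def pvStepB (t0 t1 : Int) (st : Int × Int × Int) (p : Int × Int) : Int × Int × Int :=
  let s : Int × Int :=
    if PySem.Int.mod p.1 2 == 0 then (t0 - st.1 - p.2, t1 - st.2.1)
    else (t0 - st.1, t1 - st.2.1 - p.2)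
  let res := if st.1 + s.2 == st.2.1 + s.1 then st.2.2 + 1 else st.2.2
  if PySem.Int.mod p.1 2 == 0 then (st.1 + p.2, st.2.1, res) else (st.1, st.2.1 + p.2, res)

def waysToMakeFair1_alt (nums : List Int) : Int :=
  let e := PySem.List.enumerate nums
  let t0 := ((e.filter (fun p => PySem.Int.mod p.1 2 == 0)).map Prod.snd).sum
  let t1 := ((e.filter (fun p => PySem.Int.mod p.1 2 == 1)).map Prod.snd).sum
  (e.foldl (pvStepB t0 t1) (0, 0, 0)).2.2

-- ===== PRECONDITION & SPEC =====
def Spec_waysToMakeFair1 (nums : List Int) (out : Int) : Prop := out = waysToMakeFair1_alt nums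
instance (nums : List Int) (out : Int) : Decidable (Spec_waysToMakeFair1 nums out) := by unfold Spec_waysToMakeFair1; infer_instance

-- ===== CLAIM (what is proved, stated in full; the proofs are below) =====
def Claim_equal_waysToMakeFair1 : Prop := ∀ (nums : List Int), Dom_waysToMakeFair1 nums → Spec_waysToMakeFair1 nums (waysToMakeFair1 nums)

-- ===== LEMMAS AND PROOFS =====

-- sum of nums at even (resp. odd) indices below k
def pvE (nums : List Int) (k : Nat) : Int :=
  (((List.range k).filter (fun j => j % 2 == 0)).map (fun j => nums.getD j 0)).sum
def pvO (nums : List Int) (k : Nat) : Int :=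
  (((List.range k).filter (fun j => j % 2 == 1)).map (fun j => nums.getD j 0)).sum

lemma pvPyRange_natCast : ∀ (d a b : Nat), b - a = d →
    PySem.List.pyRange (a : Int) (b : Int) = (List.range' a d).map (fun k : Nat => (k : Int))
  | 0, a, b, h => by
    have hba : (b : Int) ≤ (a : Int) := by exact_mod_cast Nat.le_of_sub_eq_zero h
    simp [PySem.List.pyRange_one_eq_nil hba]
  | d+1, a, b, h => by
    have hab : (a : Int) < (b : Int) := by exact_mod_cast Nat.lt_of_sub_eq_succ h
    rw [PySem.List.pyRange_one_cons hab]
    have hc : ((a : Int) + 1) = ((a + 1 : Nat) : Int) := by push_cast; ring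
    rw [hc, pvPyRange_natCast d (a+1) b (by omega)]
    simp [List.range'_succ]

lemma pvSuffixSum (p : Nat → Bool) (g : Nat → Int) (k n : Nat) (h : k + 1 ≤ n) :
    (((List.range' (k + 1) (n - (k + 1))).filter p).map g).sum
      = (((List.range n).filter p).map g).sum - (((List.range (k + 1)).filter p).map g).sum := by
  have hsplit : List.range' 0 (k+1) ++ List.range' (0 + 1 * (k+1)) (n - (k+1)) = List.range' 0 ((k+1) + (n - (k+1))) :=
    List.range'_append
  have hn : (k+1) + (n - (k+1)) = n := by omega
  rw [hn] at hsplit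
  simp only [Nat.zero_add, Nat.one_mul] at hsplit
  rw [List.range_eq_range', List.range_eq_range', ← hsplit, List.filter_append, List.map_append, List.sum_append]
  ring

lemma pvInnerA_eq (nums : List Int) (k : Nat) (h : k < nums.length) :
    pvInnerA nums (k : Int) (nums.length : Int)
      = (pvO nums nums.length - pvO nums (k + 1), pvE nums nums.length - pvE nums (k + 1)) := by
  unfold pvInnerA
  have hc : ((k : Int) + 1) = ((k + 1 : Nat) : Int) := by push_cast; ring
  rw [hc, pvPyRange_natCast (nums.length - (k+1)) (k+1) nums.length rfl]
  simp only [List.foldl_map]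
  have hcongr := PySem.List.foldl_congr_mem (List.range' (k + 1) (nums.length - (k + 1)))
      (fun (r : Int × Int) (j : Nat) =>
        if (PySem.Int.mod ((j : Int) - 1) 2 == 0) = true then (r.1 + PySem.List.pyGetD nums (j : Int) 0, r.2)
        else (r.1, r.2 + PySem.List.pyGetD nums (j : Int) 0))
      (fun (r : Int × Int) (j : Nat) =>
        ((if j % 2 == 1 then r.1 + nums.getD j 0 else r.1),
         (if j % 2 == 0 then r.2 + nums.getD j 0 else r.2)))
      ((0 : Int), (0 : Int)) ?_
  rw [hcongr]
  case _ =>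
    rw [PySem.List.foldl_prod_mk
      (f := fun (a : Int) (j : Nat) => if j % 2 == 1 then a + nums.getD j 0 else a)
      (g := fun (a : Int) (j : Nat) => if j % 2 == 0 then a + nums.getD j 0 else a)]
    rw [PySem.List.foldl_if_eq_foldl_filter (fun j => j % 2 == 1) (fun a j => a + nums.getD j 0),
        PySem.List.foldl_if_eq_foldl_filter (fun j => j % 2 == 0) (fun a j => a + nums.getD j 0),
        PySem.List.foldl_add, PySem.List.foldl_add,
        pvSuffixSum _ _ _ _ h, pvSuffixSum _ _ _ _ h]
    simp [pvE, pvO]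
  case _ =>
    intro acc j hj
    have hj1 : 1 ≤ j := by
      have := List.mem_range'.1 hj; omega
    have hcast : ((j : Int) - 1) = ((j - 1 : Nat) : Int) := by push_cast [hj1]; ring
    simp only [hcast, PySem.List.pyGetD_natCast]
    rcases Nat.even_or_odd j with he | ho
    · have h0 : j % 2 = 0 := Nat.even_iff.1 he
      have h1 : ((j - 1 : Nat) : Int) % 2 = 1 := by omega
      simp [h0, h1]
    · have h0 : j % 2 = 1 := Nat.odd_iff.1 ho
      have h1 : ((j - 1 : Nat) : Int) % 2 = 0 := by omega
      simp [h0, h1]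

lemma pvE_succ (nums : List Int) (k : Nat) :
    pvE nums (k + 1) = pvE nums k + (if k % 2 = 0 then nums.getD k 0 else 0) := by
  unfold pvE
  rw [List.range_succ, List.filter_append, List.map_append, List.sum_append]
  by_cases hk : k % 2 = 0 <;> simp [hk]

lemma pvO_succ (nums : List Int) (k : Nat) :
    pvO nums (k + 1) = pvO nums k + (if k % 2 = 1 then nums.getD k 0 else 0) := by
  unfold pvO
  rw [List.range_succ, List.filter_append, List.map_append, List.sum_append]
  by_cases hk : k % 2 = 1 <;> simp [hk]

lemma pvT0_eq (nums : List Int) :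
    (((PySem.List.enumerate nums).filter (fun p => PySem.Int.mod p.1 2 == 0)).map Prod.snd).sum
      = pvE nums nums.length := by
  rw [PySem.List.enumerate_eq_map_pyRange nums 0]
  have hlen : PySem.List.len nums = (nums.length : Int) := by simp [PySem.List.len]
  rw [hlen, PySem.List.pyRange_zero_natCast, List.map_map, List.filter_map, List.map_map]
  unfold pvE
  rw [List.filter_congr (q := fun j => j % 2 == 0) ?_]
  · rw [List.map_congr_left ?_]
    intro j hj
    simp [PySem.List.pyGetD_natCast]
  · intro j hj
    simp
    omega

lemma pvT1_eq (nums : List Int) :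
    (((PySem.List.enumerate nums).filter (fun p => PySem.Int.mod p.1 2 == 1)).map Prod.snd).sum
      = pvO nums nums.length := by
  rw [PySem.List.enumerate_eq_map_pyRange nums 0]
  have hlen : PySem.List.len nums = (nums.length : Int) := by simp [PySem.List.len]
  rw [hlen, PySem.List.pyRange_zero_natCast, List.map_map, List.filter_map, List.map_map]
  unfold pvO
  rw [List.filter_congr (q := fun j => j % 2 == 1) ?_]
  · rw [List.map_congr_left ?_]
    intro j hj
    simp [PySem.List.pyGetD_natCast]
  · intro j hj
    simp
    omega

lemma pvLoop (nums : List Int) : ∀ k, k ≤ nums.length →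
    ((List.range k).map (fun j : Nat => (j : Int))).foldl (pvStepA nums (nums.length : Int)) (0, 0, 0)
        = ((List.range k).map (fun j : Nat => ((j : Int), nums.getD j 0))).foldl
            (pvStepB (pvE nums nums.length) (pvO nums nums.length)) (0, 0, 0)
    ∧ (((List.range k).map (fun j : Nat => (j : Int))).foldl (pvStepA nums (nums.length : Int)) (0, 0, 0)).1
        = pvE nums k
    ∧ (((List.range k).map (fun j : Nat => (j : Int))).foldl (pvStepA nums (nums.length : Int)) (0, 0, 0)).2.1
        = pvO nums k := by
  intro k
  induction k with
  | zero => intro _; refine ⟨rfl, ?_, ?_⟩ <;> simp [pvE, pvO]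
  | succ k ih =>
    intro hk1
    have hk : k < nums.length := hk1
    obtain ⟨heq, hE, hO⟩ := ih (le_of_lt hk)
    rw [List.range_succ, List.map_append, List.map_append, List.foldl_append, List.foldl_append]
    rw [← heq]
    set st := ((List.range k).map (fun j : Nat => (j : Int))).foldl (pvStepA nums (nums.length : Int)) (0, 0, 0) with hst
    simp only [List.map_cons, List.map_nil, List.foldl_cons, List.foldl_nil]
    -- one step
    have hmod : PySem.Int.mod (k : Int) 2 = ((k % 2 : Nat) : Int) := by
      simp
    have hinner := pvInnerA_eq nums k hk
    have hEn := pvE_succ nums k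
    have hOn := pvO_succ nums k
    rcases Nat.even_or_odd k with hev | hod
    · have h0 : k % 2 = 0 := Nat.even_iff.1 hev
      have hm : PySem.Int.mod (k : Int) 2 = 0 := by rw [hmod, h0]; rfl
      have hcond : (st.1 + (pvInnerA nums (k : Int) (nums.length : Int)).1
            == st.2.1 + (pvInnerA nums (k : Int) (nums.length : Int)).2)
          = (st.1 + (pvO nums nums.length - st.2.1)
            == st.2.1 + (pvE nums nums.length - st.1 - nums.getD k 0)) := by
        rw [hinner]
        have e1 : st.1 + (pvO nums nums.length - pvO nums (k+1)) = st.1 + (pvO nums nums.length - st.2.1) := by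
          rw [hOn, hO]; simp [h0]
        have e2 : st.2.1 + (pvE nums nums.length - pvE nums (k+1)) = st.2.1 + (pvE nums nums.length - st.1 - nums.getD k 0) := by
          rw [hEn, hE]; simp [h0]; ring
        rw [e1, e2]
      refine ⟨?_, ?_, ?_⟩
      · simp only [pvStepA, pvStepB, hm, PySem.List.pyGetD_natCast, hcond]
        simp
      · simp only [pvStepA, hm, PySem.List.pyGetD_natCast]
        simp [hEn, hE, h0]
      · simp only [pvStepA, hm, PySem.List.pyGetD_natCast]
        simp [hOn, hO, h0]
    · have h0 : k % 2 = 1 := Nat.odd_iff.1 hod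
      have hm : PySem.Int.mod (k : Int) 2 = 1 := by rw [hmod, h0]; rfl
      have hcond : (st.1 + (pvInnerA nums (k : Int) (nums.length : Int)).1
            == st.2.1 + (pvInnerA nums (k : Int) (nums.length : Int)).2)
          = (st.1 + (pvO nums nums.length - st.2.1 - nums.getD k 0)
            == st.2.1 + (pvE nums nums.length - st.1)) := by
        rw [hinner]
        have e1 : st.1 + (pvO nums nums.length - pvO nums (k+1)) = st.1 + (pvO nums nums.length - st.2.1 - nums.getD k 0) := by
          rw [hOn, hO]; simp [h0]; ring
        have e2 : st.2.1 + (pvE nums nums.length - pvE nums (k+1)) = st.2.1 + (pvE nums nums.length - st.1) := by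
          rw [hEn, hE]; simp [h0]
        rw [e1, e2]
      refine ⟨?_, ?_, ?_⟩
      · simp only [pvStepA, pvStepB, hm, PySem.List.pyGetD_natCast, hcond]
        simp
      · simp only [pvStepA, hm, PySem.List.pyGetD_natCast]
        simp [hEn, hE, h0]
      · simp only [pvStepA, hm, PySem.List.pyGetD_natCast]
        simp [hOn, hO, h0]

-- ===== VERDICT (by name: the statement is the Claim_ definition above) =====
theorem waysToMakeFair1_spec : Claim_equal_waysToMakeFair1 := by
  intro nums _
  unfold Spec_waysToMakeFair1 waysToMakeFair1 waysToMakeFair1_alt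
  have hlen : PySem.List.len nums = (nums.length : Int) := by simp [PySem.List.len]
  simp only [pvT0_eq, pvT1_eq, hlen]
  rw [PySem.List.enumerate_eq_map_pyRange nums 0, hlen]
  simp only [PySem.List.pyRange_zero_natCast, List.map_map]
  rw [List.map_congr_left (g := fun j : Nat => ((j : Int), nums.getD j 0)) ?_]
  · exact congrArg (fun st => st.2.2) (pvLoop nums nums.length le_rfl).1
  · intro j hj
    simp [PySem.List.pyGetD_natCast]
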